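-- pv_equiv track=rewrite | github.com/ReethaElancheral/python | finalprojects50/22_password_strength_checker/password_checker.py | password_criteria
-- ===== SOURCE A (Python) =====
-- import string
--
-- def password_criteria(password):
--     if len(password) < 6:
--         yield "Password should be at least 6 characters long"
--     if not any(c.isupper() for c in password):
--         yield "Add at least one uppercase letter"
--     if not any(c.islower() for c in password):
--         yield "Add at least one lowercase letter"
--     if not any(c.isdigit() for c in password):
--         yield "Add at least one number"
--     if not any(c in string.punctuation for c in password):
--         yield "Add at least one special character"
-- ===== SOURCE B (Python) =====
-- import string
--
-- def password_criteria(password):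
--     def classify(c):
--         if c.isupper():
--             return "upper"
--         if c.islower():
--             return "lower"
--         if c.isdigit():
--             return "digit"
--         if c in string.punctuation:
--             return "special"
--         return None
--
--     present = {classify(c) for c in password}
--     if len(password) < 6:
--         yield "Password should be at least 6 characters long"
--     for cls, msg in (("upper", "Add at least one uppercase letter"),
--                      ("lower", "Add at least one lowercase letter"),
--                      ("digit", "Add at least one number"),
--                      ("special", "Add at least one special character")):
--         if cls not in present:
--             yield msg
-- ===== Notes on version B (the rewrite author's own statement) =====
-- stated objective: alternative
-- what changed: Instead of testing four existence predicates, B classifies each character once into a category name, collects the set of categories present, and then walks a data-driven (category, message) rules table emitting the message for each category missing from the set.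
import Mathlib
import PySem

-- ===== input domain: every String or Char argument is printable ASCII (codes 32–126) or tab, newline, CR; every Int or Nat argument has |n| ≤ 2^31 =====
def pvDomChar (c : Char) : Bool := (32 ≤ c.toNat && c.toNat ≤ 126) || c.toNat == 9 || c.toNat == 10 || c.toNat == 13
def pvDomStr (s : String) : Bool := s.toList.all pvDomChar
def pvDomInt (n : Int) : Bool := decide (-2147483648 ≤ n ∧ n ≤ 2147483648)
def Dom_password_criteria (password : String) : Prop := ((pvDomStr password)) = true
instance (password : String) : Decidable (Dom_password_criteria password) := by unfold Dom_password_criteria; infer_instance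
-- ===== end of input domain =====

-- B replaces A's four existence scans by classifying each character into a category name, collecting the set of categories present, and emitting messages from a data-driven rules table for categories missing from the set (alternative decomposition, same cost, same messages in the same order).


-- string.punctuation
def pyPunct : List Char := "!\"#$%&'()*+,-./:;<=>?@[\\]^_`{|}~".toList

-- ===== PORT A =====
-- each `if not any(...)` of A becomes an `if !(cs.any ...)` appending its message
def password_criteria (password : String) : List String :=
  let cs := password.toList
  (if cs.length < 6 then ["Password should be at least 6 characters long"] else []) ++
  (if !(cs.any PySem.Chars.isupper) then ["Add at least one uppercase letter"] else []) ++
  (if !(cs.any PySem.Chars.islower) then ["Add at least one lowercase letter"] else []) ++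
  (if !(cs.any PySem.Chars.isdigit) then ["Add at least one number"] else []) ++
  (if !(cs.any pyPunct.contains) then ["Add at least one special character"] else [])

-- ===== PORT B =====
-- B's `classify` helper: first matching category name, else None
def pyClassify (c : Char) : Option String :=
  if PySem.Chars.isupper c then some "upper"
  else if PySem.Chars.islower c then some "lower"
  else if PySem.Chars.isdigit c then some "digit"
  else if pyPunct.contains c then some "special"
  else none

-- B's rules table of (category, message)
def pwRules : List (String × String) :=
  [("upper", "Add at least one uppercase letter"),
   ("lower", "Add at least one lowercase letter"),
   ("digit", "Add at least one number"),
   ("special", "Add at least one special character")]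

-- B: set comprehension {classify(c) for c in password}, then the rules loop
def password_criteria_alt (password : String) : List String :=
  let cs := password.toList
  let present : PySem.Set (Option String) := PySem.Set.ofList (cs.map pyClassify)
  (if cs.length < 6 then ["Password should be at least 6 characters long"] else []) ++
  pwRules.foldl
    (fun acc r => if !(present.contains (some r.1)) then acc ++ [r.2] else acc) []

-- ===== PRECONDITION & SPEC =====
def Spec_password_criteria (password : String) (out : List String) : Prop := out = password_criteria_alt password
instance (password : String) (out : List String) : Decidable (Spec_password_criteria password out) := by unfold Spec_password_criteria; infer_instance

-- ===== CLAIM (what is proved, stated in full; the proofs are below) =====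
def Claim_equal_password_criteria : Prop := ∀ (password : String), Dom_password_criteria password → Spec_password_criteria password (password_criteria password)

-- ===== LEMMAS AND PROOFS =====
-- no punctuation character is an ASCII letter or digit (finite check)
theorem punct_flags :
    pyPunct.all (fun c => !PySem.Chars.isupper c && !PySem.Chars.islower c && !PySem.Chars.isdigit c) = true := by
  decide

-- the three ASCII ranges are pairwise disjoint
theorem upper_not_lower (c : Char) (h : PySem.Chars.isupper c = true) : PySem.Chars.islower c = false := by
  simp [PySem.Chars.isupper, PySem.Chars.islower, Char.le_def, UInt32.le_iff_toNat_le] at *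
  omega

theorem upper_not_digit (c : Char) (h : PySem.Chars.isupper c = true) : PySem.Chars.isdigit c = false := by
  simp [PySem.Chars.isupper, PySem.Chars.isdigit, Char.le_def, UInt32.le_iff_toNat_le] at *
  omega

theorem lower_not_digit (c : Char) (h : PySem.Chars.islower c = true) : PySem.Chars.isdigit c = false := by
  simp [PySem.Chars.islower, PySem.Chars.isdigit, Char.le_def, UInt32.le_iff_toNat_le] at *
  omega

-- classify c names category k iff the corresponding predicate holds
theorem classify_upper (c : Char) : pyClassify c = some "upper" ↔ PySem.Chars.isupper c = true := by
  unfold pyClassify; split_ifs with h1 h2 h3 h4 <;> simp_all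

theorem classify_lower (c : Char) : pyClassify c = some "lower" ↔ PySem.Chars.islower c = true := by
  unfold pyClassify; split_ifs with h1 h2 h3 h4 <;>
    simp_all [upper_not_lower]

theorem classify_digit (c : Char) : pyClassify c = some "digit" ↔ PySem.Chars.isdigit c = true := by
  unfold pyClassify; split_ifs with h1 h2 h3 h4 <;>
    simp_all [upper_not_digit, lower_not_digit]

theorem classify_special (c : Char) : pyClassify c = some "special" ↔ pyPunct.contains c = true := by
  unfold pyClassify
  split_ifs with h1 h2 h3 h4 <;> simp_all <;>
    (intro hm
     have := List.all_eq_true.mp punct_flags c hm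
     simp at this
     simp_all)

-- the category set contains `some k` exactly when some character satisfies p
theorem present_flag (cs : List Char) (k : String) (p : Char → Bool)
    (hc : ∀ c, pyClassify c = some k ↔ p c = true) :
    (PySem.Set.ofList (cs.map pyClassify)).contains (some k) = cs.any p := by
  rw [Bool.eq_iff_iff]
  unfold PySem.Set.contains
  rw [List.contains_iff_mem, PySem.Set.mem_ofList, List.mem_map, List.any_eq_true]
  constructor
  · rintro ⟨c, hmem, hck⟩; exact ⟨c, hmem, (hc c).mp hck⟩
  · rintro ⟨c, hmem, hpc⟩; exact ⟨c, hmem, (hc c).mpr hpc⟩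

-- ===== VERDICT (by name: the statement is the Claim_ definition above) =====
theorem password_criteria_spec : Claim_equal_password_criteria := by
  intro password _
  unfold Spec_password_criteria password_criteria password_criteria_alt
  simp only [pwRules, List.foldl_cons, List.foldl_nil,
    present_flag _ _ _ classify_upper,
    present_flag _ _ _ classify_lower,
    present_flag _ _ _ classify_digit,
    present_flag _ _ _ classify_special]
  set cs := password.toList
  by_cases h0 : cs.length < 6 <;>
    by_cases h1 : cs.any PySem.Chars.isupper <;>
      by_cases h2 : cs.any PySem.Chars.islower <;>
        by_cases h3 : cs.any PySem.Chars.isdigit <;>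
          by_cases h4 : cs.any pyPunct.contains <;>
            simp [h0, h1, h2, h3, h4]
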